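-- pv_equiv track=rewrite | github.com/okmd/leetcode | stackqueues/max-sum-of-all-substring-of-size-k.py | max_sum_subarray_optimized
-- ===== SOURCE A (Python) =====
-- def max_sum_subarray_optimized(arr, k):
--     # O(n)
--     # using Q, Sliding window technique
--     i, j = 0,0
--     mx_sums=[]
--     sm = 0
--     while j<len(arr):
--         sm+=arr[j]
--         if j-i+1<k:
--             j+=1
--         elif j-i+1==k:
--             mx_sums.append(sm)
--             sm-=arr[i]
--             i+=1
--             j+=1
--     return mx_sums
-- ===== SOURCE B (Python) =====
-- def max_sum_subarray_optimized(arr, k):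
--     # prefix-sum table, then each window sum as a difference
--     prefix = [0]
--     for x in arr:
--         prefix.append(prefix[-1] + x)
--     return [prefix[i + k] - prefix[i] for i in range(len(arr) - k + 1)]
-- ===== Notes on version B (the rewrite author's own statement) =====
-- stated objective: alternative
-- what changed: Replaces the incremental add/subtract sliding-window loop with a prefix-sum table built in one pass followed by a direct difference P[i+k]-P[i] per window.
-- outside the precondition, e.g. on max_sum_subarray_optimized([], 0): A returns [], B returns [0]; on max_sum_subarray_optimized([], -1): A returns [], B raises IndexError
import Mathlib
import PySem

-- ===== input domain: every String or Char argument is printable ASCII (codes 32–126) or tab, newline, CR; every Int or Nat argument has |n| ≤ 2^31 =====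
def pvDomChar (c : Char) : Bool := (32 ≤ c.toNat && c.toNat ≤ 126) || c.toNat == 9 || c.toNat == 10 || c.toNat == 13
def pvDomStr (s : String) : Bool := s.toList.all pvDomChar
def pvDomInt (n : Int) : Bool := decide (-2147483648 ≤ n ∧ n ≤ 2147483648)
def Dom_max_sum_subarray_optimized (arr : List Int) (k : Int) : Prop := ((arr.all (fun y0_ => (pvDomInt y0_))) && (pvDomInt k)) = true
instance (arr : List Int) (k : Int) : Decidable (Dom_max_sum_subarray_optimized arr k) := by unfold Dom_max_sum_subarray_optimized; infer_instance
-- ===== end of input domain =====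

-- B replaces A's incremental sliding-window loop by a pfx-sum table and per-window differences (alternative decomposition, same O(n) cost).


-- ===== PORT A =====
-- A's while-loop; the final 'else' branch (j-i+1 > k, where Python A loops forever,
-- reachable only for k ≤ 0, i.e. outside Pre_) returns the accumulator to make the port total.
def loopA (arr : List Int) (k : Int) : Nat → Nat → Nat → Int → List Int → List Int
  | 0, _, _, _, acc => acc
  | fuel + 1, i, j, sm, acc =>
    if h : j < arr.length then
      let sm' := sm + arr[j]
      if ((j : Int) - i + 1) < k then
        loopA arr k fuel i (j + 1) sm' acc
      else if ((j : Int) - i + 1) = k then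
        loopA arr k fuel (i + 1) (j + 1) (sm' - arr.getD i 0) (acc ++ [sm'])
      else
        acc
    else
      acc

def max_sum_subarray_optimized (arr : List Int) (k : Int) : List Int :=
  loopA arr k arr.length 0 0 0 []

-- ===== PORT B =====
def max_sum_subarray_optimized_alt (arr : List Int) (k : Int) : List Int :=
  let pfx := arr.foldl (fun P x => P ++ [P.getLastD 0 + x]) [0]
  (PySem.List.pyRange 0 ((arr.length : Int) - k + 1) 1).map (fun i =>
    PySem.List.pyGetD pfx (i + k) 0 - PySem.List.pyGetD pfx i 0)

-- ===== PRECONDITION & SPEC =====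
-- Pre_ excludes k ≤ 0: there Python A loops forever on every nonempty arr, and returns []
-- only on the accidental empty-list corner; a window size below 1 is outside the function's natural domain.
def Pre_max_sum_subarray_optimized (arr : List Int) (k : Int) : Prop := 1 ≤ k
instance (arr : List Int) (k : Int) : Decidable (Pre_max_sum_subarray_optimized arr k) := by unfold Pre_max_sum_subarray_optimized; infer_instance
def pvWitness_max_sum_subarray_optimized : List Int × Int := ([1, -2, 3, 4], 2)
def Spec_max_sum_subarray_optimized (arr : List Int) (k : Int) (out : List Int) : Prop := out = max_sum_subarray_optimized_alt arr k
instance (arr : List Int) (k : Int) (out : List Int) : Decidable (Spec_max_sum_subarray_optimized arr k out) := by unfold Spec_max_sum_subarray_optimized; infer_instance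

-- ===== CLAIM (what is proved, stated in full; the proofs are below) =====
def Claim_equal_max_sum_subarray_optimized : Prop := ∀ (arr : List Int) (k : Int), Dom_max_sum_subarray_optimized arr k → Pre_max_sum_subarray_optimized arr k → Spec_max_sum_subarray_optimized arr k (max_sum_subarray_optimized arr k)

-- ===== LEMMAS AND PROOFS =====

-- the common specification: window sums
def win (arr : List Int) (kn t : Nat) : Int := ((arr.drop t).take kn).sum

-- A-side: the loop invariant
lemma sum_take_succ (l : List Int) (j : Nat) (h : j < l.length) :
    (l.take (j + 1)).sum = (l.take j).sum + l[j] := by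
  rw [List.take_succ, List.sum_append]
  simp [List.getElem?_eq_getElem h]

lemma sum_take_win (arr : List Int) (kn j : Nat) :
    (arr.take (j + kn)).sum = (arr.take j).sum + win arr kn j := by
  rw [List.take_add, List.sum_append, win]


lemma loopA_spec (arr : List Int) (k : Int) (kn : Nat) (hk : (kn : Int) = k) (hk1 : 1 ≤ kn) :
    ∀ fuel j i (sm : Int) (acc : List Int), arr.length - j ≤ fuel → j ≤ arr.length →
      i = j - min j (kn - 1) →
      sm = ((arr.take j).sum - (arr.take i).sum) →
      loopA arr k fuel i j sm acc =
        acc ++ (List.range' i (arr.length + 1 - kn - i)).map (win arr kn) := by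
  intro fuel
  induction fuel with
  | zero =>
    intro j i sm acc hm hj hi hsm
    have hjl : j = arr.length := by omega
    have : arr.length + 1 - kn - i = 0 := by omega
    rw [loopA, this]
    simp
  | succ m' ih =>
    intro j i sm acc hm hj hi hsm
    by_cases hjl : j < arr.length
    case neg =>
      have hje : j = arr.length := by omega
      have : arr.length + 1 - kn - i = 0 := by omega
      rw [loopA, dif_neg hjl, this]
      simp
    rw [loopA, dif_pos hjl]
    by_cases hcase : j + 1 < kn
    · -- growing phase
      have hi0 : i = 0 := by omega
      rw [if_pos (by rw [← hk]; omega)]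
      rw [ih (j + 1) i (sm + arr[j]) acc (by omega) (by omega) (by omega)
        (by rw [hsm, sum_take_succ arr j hjl]; ring)]
    · -- steady phase: j - i + 1 = k
      have hik : i = j + 1 - kn := by omega
      rw [if_neg (by rw [← hk]; omega), if_pos (by rw [← hk]; omega)]
      have hil : i < arr.length := by omega
      rw [ih (j + 1) (i + 1) (sm + arr[j] - arr.getD i 0) (acc ++ [sm + arr[j]])
        (by omega) (by omega) (by omega)
        (by rw [List.getD_eq_getElem _ _ hil, hsm, sum_take_succ arr j hjl,
              sum_take_succ arr i hil]; ring)]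
      have hcnt : arr.length + 1 - kn - i = (arr.length + 1 - kn - (i + 1)) + 1 := by omega
      rw [hcnt, List.range'_succ, List.map_cons, List.append_assoc, List.singleton_append]
      congr 2
      have hji : j + 1 = i + kn := by omega
      rw [show win arr kn i = (arr.take (i + kn)).sum - (arr.take i).sum from by
            rw [sum_take_win]; ring,
          ← hji, sum_take_succ arr j hjl, hsm]
      ring

lemma portA_eq_windows (arr : List Int) (k : Int) (hk : 1 ≤ k) :
    max_sum_subarray_optimized arr k =
      (List.range' 0 (arr.length + 1 - k.toNat)).map (win arr k.toNat) := by
  have hkn : ((k.toNat : Int)) = k := by omega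
  have := loopA_spec arr k k.toNat hkn (by omega) arr.length 0 0 0 []
    (by omega) (by omega) (by omega) (by simp)
  simpa [max_sum_subarray_optimized] using this

-- B-side: the pfx-sum fold
lemma foldP (arr : List Int) : ∀ (acc : List Int) (s : Int), acc.getLastD 0 = s →
    arr.foldl (fun P x => P ++ [P.getLastD 0 + x]) acc =
      acc ++ (List.range arr.length).map (fun t => s + (arr.take (t + 1)).sum) := by
  induction arr with
  | nil => simp
  | cons x rest ih =>
    intro acc s hs
    simp only [List.foldl_cons, List.length_cons, hs]
    rw [ih (acc ++ [s + x]) (s + x) (by simp), List.range_succ_eq_map]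
    simp only [List.map_cons, List.map_map, List.append_assoc, List.cons_append,
      List.nil_append, List.take_succ_cons, List.sum_cons]
    have he : (fun t => s + x + (List.take (t + 1) rest).sum)
        = (fun t => s + ((x :: rest).take (Nat.succ t + 1)).sum) := by
      funext t; simp [List.take_succ_cons]; ring
    simp [he]

lemma pfx_getD (arr : List Int) (t : Nat) (ht : t ≤ arr.length) :
    (arr.foldl (fun P x => P ++ [P.getLastD 0 + x]) [0]).getD t 0 = (arr.take t).sum := by
  rw [foldP arr [0] 0 (by simp)]
  cases t with
  | zero => simp
  | succ s =>
    simp only [List.cons_append, List.nil_append, List.getD_cons_succ]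
    rw [List.getD_eq_getElem _ _ (by simpa using Nat.lt_of_succ_le ht)]
    simp

lemma portB_eq_windows (arr : List Int) (k : Int) (hk : 1 ≤ k) :
    max_sum_subarray_optimized_alt arr k =
      (List.range' 0 (arr.length + 1 - k.toNat)).map (win arr k.toNat) := by
  unfold max_sum_subarray_optimized_alt
  rw [PySem.List.pyRange_one, List.map_map, ← List.range_eq_range']
  have hm : (((arr.length : Int) - k + 1) - 0).toNat = arr.length + 1 - k.toNat := by omega
  rw [hm]
  apply List.map_congr_left
  intro j hj
  have hj' : j < arr.length + 1 - k.toNat := List.mem_range.mp hj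
  have h1 : ((j : Int)) + k = ((j + k.toNat : Nat) : Int) := by omega
  simp only [Function.comp_apply, zero_add, h1, PySem.List.pyGetD_natCast]
  rw [pfx_getD arr (j + k.toNat) (by omega), pfx_getD arr j (by omega),
    sum_take_win arr k.toNat j]
  ring

-- ===== VERDICT (by name: the statement is the Claim_ definition above) =====
theorem max_sum_subarray_optimized_spec : Claim_equal_max_sum_subarray_optimized := by
  intro arr k _ hk
  unfold Spec_max_sum_subarray_optimized
  rw [portA_eq_windows arr k hk, portB_eq_windows arr k hk]
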